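-- pv_equiv track=rewrite | github.com/abhishekparve/Leet-Code | String/Easy/290_Word_To_Pattern.py | wordToPattern
-- ===== SOURCE A (Python) =====
-- def wordToPattern(pattern, s):
--     map1 = []
--     map2 = []
--     s = s.split()
--     for i in pattern:
--         map1.append(pattern.index(i))
--     for j in s:
--         map2.append(s.index(j))
--     if map1 == map2:
--         return True
--     else:
--         return False
-- ===== SOURCE B (Python) =====
-- def wordToPattern(pattern, s):
--     # Bijection test via distinct counts: the pattern matches iff lengths agree and
--     # the number of distinct (symbol, word) pairs equals the number of distinct
--     # symbols and the number of distinct words (so symbol <-> word is one-to-one).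
--     words = s.split()
--     if len(pattern) != len(words):
--         return False
--     pairs = len(set(zip(pattern, words)))
--     return pairs == len(set(pattern)) and pairs == len(set(words))
-- ===== Notes on version B (the rewrite author's own statement) =====
-- stated objective: faster
-- what changed: A builds two first-occurrence index lists by calling .index (a linear scan) for every position and compares the lists; B never computes any indices: it checks lengths and then tests that the symbol-word relation is a bijection by comparing three set cardinalities, len(set(zip(pattern,words))) == len(set(pattern)) == len(set(words)).
import Mathlib
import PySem

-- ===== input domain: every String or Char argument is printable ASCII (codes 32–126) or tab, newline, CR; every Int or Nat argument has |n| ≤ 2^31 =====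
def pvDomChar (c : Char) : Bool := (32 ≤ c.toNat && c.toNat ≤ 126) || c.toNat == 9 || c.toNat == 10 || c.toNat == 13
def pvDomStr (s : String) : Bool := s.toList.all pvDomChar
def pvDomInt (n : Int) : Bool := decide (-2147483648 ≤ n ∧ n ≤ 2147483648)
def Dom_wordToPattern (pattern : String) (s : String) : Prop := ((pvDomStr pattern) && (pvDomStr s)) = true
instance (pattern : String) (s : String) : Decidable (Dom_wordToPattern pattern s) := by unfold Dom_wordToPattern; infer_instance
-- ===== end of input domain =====

-- B replaces A's quadratic repeated .index scans by a bijection test on three distinct-element counts (faster, asymptotic).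


-- ===== PORT A =====
-- 'for i in pattern: map1.append(pattern.index(i))' — i is a single character of pattern, so
-- pattern.index(i) is the first occurrence of that character and always succeeds: index? is
-- always some here, and '.getD 0' is exact.  Likewise s.index(j) with j a word of the split list.
def wordToPattern (pattern : String) (s : String) : Bool :=
  let ps := pattern.toList
  let words := PySem.Str.split₀ s
  let map1 := ps.map (fun c => (PySem.List.index? ps c).getD 0)
  let map2 := words.map (fun w => (PySem.List.index? words w).getD 0)
  if map1 = map2 then true else false

-- ===== PORT B =====
-- lengths equal, then bijection test by distinct counts: |set(zip)| = |set(pattern)| = |set(words)|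
def wordToPattern_alt (pattern : String) (s : String) : Bool :=
  let words := PySem.Str.split₀ s
  let ps := pattern.toList
  if ps.length ≠ words.length then false
  else
    let pairs := PySem.Set.len (PySem.Set.ofList (ps.zip words))
    decide (pairs = PySem.Set.len (PySem.Set.ofList ps) ∧
            pairs = PySem.Set.len (PySem.Set.ofList words))

-- ===== PRECONDITION & SPEC =====
def Spec_wordToPattern (pattern : String) (s : String) (out : Bool) : Prop := out = wordToPattern_alt pattern s
instance (pattern : String) (s : String) (out : Bool) : Decidable (Spec_wordToPattern pattern s out) := by unfold Spec_wordToPattern; infer_instance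

-- ===== CLAIM (what is proved, stated in full; the proofs are below) =====
def Claim_equal_wordToPattern : Prop := ∀ (pattern : String) (s : String), Dom_wordToPattern pattern s → Spec_wordToPattern pattern s (wordToPattern pattern s)

-- ===== LEMMAS AND PROOFS =====

-- first-occurrence index of xs[i], as a total Nat (what A stores)
def pvFirst {α : Type} [DecidableEq α] (xs : List α) (v : α) : Nat :=
  (PySem.List.index? xs v).getD 0

-- spec of pvFirst at a member: it is the least index holding the value
theorem pvFirst_spec {α : Type} [DecidableEq α] (xs : List α) (i : Nat) (hi : i < xs.length) :
    ∃ hk : pvFirst xs xs[i] < xs.length,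
      xs[pvFirst xs xs[i]] = xs[i] ∧ ∀ j (hj : j < pvFirst xs xs[i]), xs[j] ≠ xs[i] := by
  obtain ⟨k, hk⟩ := Option.isSome_iff_exists.mp
    ((PySem.List.index?_isSome_iff xs xs[i]).mpr (List.getElem_mem hi))
  have hspec := PySem.List.getElem_of_index?_eq_some hk
  have hfk : pvFirst xs xs[i] = k := by
    simp only [pvFirst, hk, Option.getD_some]
  obtain ⟨hlt, hv, hmin⟩ := hspec
  exact ⟨hfk ▸ hlt, by simp only [hfk]; exact hv, by simp only [hfk]; exact hmin⟩

-- least index with a given property is unique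
theorem pvFirst_eq_of_spec {α : Type} [DecidableEq α] (xs : List α) (v : α) (k : Nat)
    (hk : k < xs.length) (hv : xs[k] = v) (hmin : ∀ j (hj : j < k), xs[j] ≠ v) :
    pvFirst xs v = k := by
  have hidx : PySem.List.index? xs v = some k := by
    rw [PySem.List.index?_eq_some_iff]
    refine ⟨xs.take k, xs.drop (k + 1), ?_, by simp [Nat.le_of_lt hk], ?_⟩
    · conv_lhs => rw [← List.take_append_drop k xs]
      rw [List.drop_eq_getElem_cons hk, hv]
    · intro hmem
      rw [List.mem_take_iff_getElem] at hmem
      obtain ⟨j, hj, he⟩ := hmem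
      exact hmin j (by omega) (by simpa using he)
  simp only [pvFirst, hidx, Option.getD_some]

-- two positions have equal first-occurrence indices iff they hold equal values
theorem pvFirst_eq_iff {α : Type} [DecidableEq α] (xs : List α) (i j : Nat)
    (hi : i < xs.length) (hj : j < xs.length) :
    pvFirst xs xs[i] = pvFirst xs xs[j] ↔ xs[i] = xs[j] := by
  constructor
  · intro h
    obtain ⟨hki, hvi, _⟩ := pvFirst_spec xs i hi
    obtain ⟨hkj, hvj, _⟩ := pvFirst_spec xs j hj
    calc xs[i] = xs[pvFirst xs xs[i]] := hvi.symm
      _ = xs[pvFirst xs xs[j]]'(h ▸ hki) := by congr 1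
      _ = xs[j] := by rw [hvj]
  · intro h; rw [h]

-- A's list equality ↔ equal lengths and the two equality relations on positions coincide
theorem mapsEq_iff_rel {α β : Type} [DecidableEq α] [DecidableEq β]
    (xs : List α) (ys : List β) (h : xs.length = ys.length) :
    xs.map (fun c => (PySem.List.index? xs c).getD 0)
      = ys.map (fun w => (PySem.List.index? ys w).getD 0)
    ↔ ∀ i (hi : i < xs.length),
        ∀ j (hj : j < xs.length),
          (xs[i] = xs[j] ↔ ys[i]'(h ▸ hi) = ys[j]'(h ▸ hj)) := by
  have hlen : (xs.map (fun c => (PySem.List.index? xs c).getD 0)).length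
      = (ys.map (fun w => (PySem.List.index? ys w).getD 0)).length := by simp [h]
  rw [List.ext_getElem_iff]
  constructor
  · rintro ⟨-, hpt⟩ i hi j hj
    have hp : ∀ m (hm : m < xs.length), pvFirst xs xs[m] = pvFirst ys (ys[m]'(h ▸ hm)) := by
      intro m hm
      have := hpt m (by simpa using hm) (by simp [← h, hm])
      simpa [pvFirst] using this
    rw [← pvFirst_eq_iff xs i j hi hj, ← pvFirst_eq_iff ys i j (h ▸ hi) (h ▸ hj),
        ← hp i hi, ← hp j hj]
  · intro hrel
    refine ⟨hlen, ?_⟩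
    intro m hm1 hm2
    have hm : m < xs.length := by simpa using hm1
    simp only [List.getElem_map]
    show pvFirst xs xs[m] = pvFirst ys (ys[m]'(h ▸ hm))
    obtain ⟨hk, hv, hminp⟩ := pvFirst_spec xs m hm
    refine (pvFirst_eq_of_spec ys (ys[m]'(h ▸ hm)) (pvFirst xs xs[m]) (h ▸ hk) ?_ ?_).symm
    · exact (hrel (pvFirst xs xs[m]) hk m hm).mp hv
    · intro j hj hcon
      exact hminp j hj ((hrel j (by omega) m hm).mpr hcon)

-- distinct count of a list = card of its Finset
theorem setLen_eq_card {α : Type} [BEq α] [LawfulBEq α] [DecidableEq α] (xs : List α) :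
    PySem.Set.len (PySem.Set.ofList xs) = (xs.toFinset.card : Int) := by
  have hd : PySem.List.dedup xs = PySem.Set.ofList xs := PySem.List.dedup_eq_ofList xs
  have hnd : (PySem.Set.ofList xs).Nodup := hd ▸ PySem.List.nodup_dedup xs
  have hfs : (PySem.Set.ofList xs).toFinset = xs.toFinset := by
    ext a
    rw [← hd, List.mem_toFinset, PySem.List.mem_dedup, List.mem_toFinset]
  have hlen : (PySem.Set.ofList xs).length = xs.toFinset.card := by
    rw [← hfs]
    exact (List.toFinset_card_of_nodup hnd).symm
  show ((PySem.Set.ofList xs).length : Int) = (xs.toFinset.card : Int)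
  exact_mod_cast congrArg Nat.cast hlen

-- toFinset as an image of the index function
theorem toFinset_eq_image {α : Type} [DecidableEq α] (xs : List α) (n : Nat) (h : xs.length = n) :
    xs.toFinset = Finset.image (fun i : Fin n => xs[(i : Nat)]'(h ▸ i.isLt)) Finset.univ := by
  subst h
  ext a
  simp [List.mem_iff_getElem, Fin.exists_iff]

-- card of the pair image equals card of the first-component image iff fst determines snd
theorem card_pair_image_iff {α β : Type} [DecidableEq α] [DecidableEq β] (n : Nat)
    (f : Fin n → α) (g : Fin n → β) :
    (Finset.image (fun i => (f i, g i)) Finset.univ).card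
        = (Finset.image f Finset.univ).card
    ↔ ∀ i j, f i = f j → g i = g j := by
  have himg : (Finset.image (fun i => (f i, g i)) Finset.univ).image Prod.fst
      = Finset.image f Finset.univ := by
    rw [Finset.image_image]; rfl
  constructor
  · intro hcard i j hfeq
    have hinj : Set.InjOn Prod.fst
        ((Finset.image (fun i => (f i, g i)) Finset.univ : Finset (α × β)) : Set (α × β)) := by
      rw [← Finset.card_image_iff, himg, hcard]
    have := hinj (x₁ := (f i, g i)) (by simp; exact ⟨i, rfl, rfl⟩)
      (x₂ := (f j, g j)) (by simp; exact ⟨j, rfl, rfl⟩) hfeq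
    exact congrArg Prod.snd this
  · intro hdet
    rw [← himg, eq_comm, Finset.card_image_iff]
    rintro ⟨a1, b1⟩ h1 ⟨a2, b2⟩ h2 hf
    simp only [Finset.coe_image, Set.mem_image, Finset.mem_coe, Finset.mem_univ,
      true_and, Prod.mk.injEq] at h1 h2 ⊢
    obtain ⟨i, hi1, hi2⟩ := h1
    obtain ⟨j, hj1, hj2⟩ := h2
    simp only at hf
    subst hi1 hi2 hj1 hj2
    exact ⟨hf, hdet i j hf⟩

-- ===== VERDICT (by name: the statement is the Claim_ definition above) =====
theorem wordToPattern_spec : Claim_equal_wordToPattern := by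
  intro pattern s _
  unfold Spec_wordToPattern wordToPattern wordToPattern_alt
  set ps := pattern.toList with hps
  set ws := PySem.Str.split₀ s with hws
  by_cases hlen : ps.length = ws.length
  · simp only [hlen, ne_eq, not_true_eq_false, if_false]
    set f : Fin ws.length → Char := fun i => ps[(i : Nat)]'(by omega) with hf
    set g : Fin ws.length → String := fun i => ws[(i : Nat)] with hg
    -- the three distinct counts as Finset cards
    have hzl : (ps.zip ws).length = ws.length := by
      rw [List.length_zip]; omega
    have hzip : (ps.zip ws).toFinset
        = Finset.image (fun i : Fin ws.length => (f i, g i)) Finset.univ := by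
      rw [toFinset_eq_image (ps.zip ws) ws.length hzl]
      congr 1
      funext i
      simp [hf, hg, List.getElem_zip]
    have hpsF : ps.toFinset = Finset.image f Finset.univ := toFinset_eq_image ps ws.length hlen
    have hwsF : ws.toFinset = Finset.image g Finset.univ := toFinset_eq_image ws ws.length rfl
    -- the swapped pair image has the same card
    have hswap : (Finset.image (fun i : Fin ws.length => (g i, f i)) Finset.univ).card
        = (Finset.image (fun i : Fin ws.length => (f i, g i)) Finset.univ).card := by
      have he : Finset.image (fun i : Fin ws.length => (g i, f i)) Finset.univ
          = Finset.image Prod.swap (Finset.image (fun i : Fin ws.length => (f i, g i)) Finset.univ) := by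
        rw [Finset.image_image]; rfl
      rw [he, Finset.card_image_of_injective _ Prod.swap_injective]
    -- B's condition ↔ the two determination directions
    have hcond : (PySem.Set.len (PySem.Set.ofList (ps.zip ws))
            = PySem.Set.len (PySem.Set.ofList ps) ∧
          PySem.Set.len (PySem.Set.ofList (ps.zip ws))
            = PySem.Set.len (PySem.Set.ofList ws))
        ↔ ((∀ i j : Fin ws.length, f i = f j → g i = g j) ∧
           (∀ i j : Fin ws.length, g i = g j → f i = f j)) := by
      rw [setLen_eq_card, setLen_eq_card, setLen_eq_card, hzip, hpsF, hwsF]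
      rw [Int.natCast_inj, Int.natCast_inj]
      rw [card_pair_image_iff ws.length f g]
      rw [← hswap, card_pair_image_iff ws.length g f]
    -- A's condition ↔ the same
    have hmaps : (ps.map (fun c => (PySem.List.index? ps c).getD 0)
          = ws.map (fun w => (PySem.List.index? ws w).getD 0))
        ↔ ((∀ i j : Fin ws.length, f i = f j → g i = g j) ∧
           (∀ i j : Fin ws.length, g i = g j → f i = f j)) := by
      rw [mapsEq_iff_rel ps ws hlen]
      constructor
      · intro hrel
        exact ⟨fun i j hij => (hrel i (by omega) j (by omega)).mp hij,
               fun i j hij => (hrel i (by omega) j (by omega)).mpr hij⟩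
      · rintro ⟨h1, h2⟩ i hi j hj
        exact ⟨fun hx => h1 ⟨i, by omega⟩ ⟨j, by omega⟩ hx,
               fun hx => h2 ⟨i, by omega⟩ ⟨j, by omega⟩ hx⟩
    by_cases hm : ps.map (fun c => (PySem.List.index? ps c).getD 0)
        = ws.map (fun w => (PySem.List.index? ws w).getD 0)
    · rw [if_pos hm, eq_comm, decide_eq_true_iff]
      exact hcond.mpr (hmaps.mp hm)
    · rw [if_neg hm, eq_comm, decide_eq_false_iff_not]
      exact fun hc => hm (hmaps.mpr (hcond.mp hc))
  · simp only [ne_eq, hlen, not_false_eq_true, if_true]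
    rw [if_neg]
    intro hcon
    apply hlen
    have := congrArg List.length hcon
    simpa using this
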